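-- pv_equiv track=rewrite | github.com/JoseWenned/Exercitando-Loops-e-Condicionais-JoseWenned | my.py | corresponding
-- ===== SOURCE A (Python) =====
-- def corresponding(input_string):
--     stack = []
--
--     unmatched = ''
--
--     for i, char in enumerate(input_string):
--         if char == "(":
--             stack.append(i)
--         elif char == ")":
--             if stack:
--                 stack.pop()
--             else:
--                 unmatched += char
--
--     unmatched += "".join(["(" for index in stack])
--
--     return unmatched
-- ===== SOURCE B (Python) =====
-- def corresponding(input_string):
--     s = ''.join(c for c in input_string if c in '()')
--     while '()' in s:
--         s = s.replace('()', '')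
--     return s
-- ===== Notes on version B (the rewrite author's own statement) =====
-- stated objective: simpler
-- what changed: Replaces A's index-stack scan with a string-rewriting fixed point: keep only paren characters, then repeatedly delete every adjacent '()' pair until none remains; the residue ')'*a + '('*b is exactly A's output.
import Mathlib
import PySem

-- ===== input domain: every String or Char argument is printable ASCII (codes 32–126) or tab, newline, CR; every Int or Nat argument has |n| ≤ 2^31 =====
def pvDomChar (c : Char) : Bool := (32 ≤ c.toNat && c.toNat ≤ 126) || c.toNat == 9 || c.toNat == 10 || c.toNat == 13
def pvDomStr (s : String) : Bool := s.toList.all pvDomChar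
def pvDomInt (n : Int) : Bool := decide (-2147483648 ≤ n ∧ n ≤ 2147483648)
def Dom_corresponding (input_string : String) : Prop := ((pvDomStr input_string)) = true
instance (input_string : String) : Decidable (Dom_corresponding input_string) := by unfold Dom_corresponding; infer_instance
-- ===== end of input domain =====

-- B replaces A's index-stack scan by a string-rewriting fixed point (delete adjacent "()" pairs
-- until none remains); objective: simpler. Equality of return values is proved on the whole domain.

-- ===== PORT A =====
-- Strings are carried as their char lists (String.ofList at the end); only the return value matters.
def pvStepA (st : List Int × List Char) (p : Int × Char) : List Int × List Char :=
  if p.2 = '(' then (st.1 ++ [p.1], st.2)            -- stack.append(i)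
  else if p.2 = ')' then
    if st.1 ≠ [] then (st.1.dropLast, st.2)          -- stack.pop()
    else (st.1, st.2 ++ [p.2])                       -- unmatched += char
  else st

def corresponding (input_string : String) : String :=
  let r := (PySem.List.enumerate input_string.toList 0).foldl pvStepA ([], [])
  -- unmatched += "".join(["(" for index in stack])
  String.ofList (r.2 ++ r.1.map (fun _ => '('))

-- ===== PORT B =====
def pvIsParen (c : Char) : Bool := c == '(' || c == ')'   -- c in '()' (exact: single-char membership)

-- one pass of s.replace('()', ''): remove all non-overlapping occurrences left to right
-- (exact for this fixed two-character pattern, ported by hand)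
def pvRepl : List Char → List Char
  | '(' :: ')' :: rest => pvRepl rest
  | c :: rest => c :: pvRepl rest
  | [] => []

-- '()' in s (exact substring test for this fixed two-character pattern, ported by hand)
def pvHasPair : List Char → Bool
  | '(' :: ')' :: _ => true
  | _ :: rest => pvHasPair rest
  | [] => false

theorem pvRepl_length_le (l : List Char) : (pvRepl l).length ≤ l.length := by
  fun_induction pvRepl l <;> simp_all <;> omega

theorem pvRepl_length_lt (l : List Char) (h : pvHasPair l = true) :
    (pvRepl l).length < l.length := by
  fun_induction pvRepl l with
  | case1 rest ih => have := pvRepl_length_le rest; simp; omega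
  | case2 c rest hne ih =>
      simp only [List.length_cons]
      have hp : pvHasPair (c :: rest) = pvHasPair rest := by
        cases rest with
        | nil => simp [pvHasPair]
        | cons d t =>
            by_cases hc : c = '(' <;> by_cases hd : d = ')' <;>
              simp_all [pvHasPair]
      rw [hp] at h
      have := ih h; omega
  | case3 => simp [pvHasPair] at h

-- while '()' in s: s = s.replace('()', '')
def pvReduce (l : List Char) : List Char :=
  if pvHasPair l then pvReduce (pvRepl l) else l
termination_by l.length
decreasing_by exact pvRepl_length_lt l (by assumption)

def corresponding_alt (input_string : String) : String :=
  String.ofList (pvReduce (input_string.toList.filter pvIsParen))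

-- ===== PRECONDITION & SPEC =====
def Spec_corresponding (input_string : String) (out : String) : Prop := out = corresponding_alt input_string
instance (input_string : String) (out : String) : Decidable (Spec_corresponding input_string out) := by unfold Spec_corresponding; infer_instance

-- ===== CLAIM (what is proved, stated in full; the proofs are below) =====
def Claim_equal_corresponding : Prop := ∀ (input_string : String), Dom_corresponding input_string → Spec_corresponding input_string (corresponding input_string)

-- ===== LEMMAS AND PROOFS =====

-- the abstract state: (unmatched-closer count, open-depth)
def pvStep (st : Nat × Nat) (c : Char) : Nat × Nat :=
  if c = '(' then (st.1, st.2 + 1)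
  else if c = ')' then (if st.2 = 0 then (st.1 + 1, 0) else (st.1, st.2 - 1))
  else st

-- non-paren characters do not change the abstract state
theorem pvFoldl_filter (l : List Char) (st : Nat × Nat) :
    List.foldl pvStep st (l.filter pvIsParen) = List.foldl pvStep st l := by
  induction l generalizing st with
  | nil => rfl
  | cons c t ih =>
      by_cases h : pvIsParen c = true
      · simp [h, List.foldl_cons, ih]
      · have h1 : ¬ c = '(' := by rintro rfl; simp [pvIsParen] at h
        have h2 : ¬ c = ')' := by rintro rfl; simp [pvIsParen] at h
        simp [h, List.foldl_cons, pvStep, h1, h2, ih]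

-- deleting adjacent "()" pairs preserves the abstract state
theorem pvFoldl_repl (l : List Char) (st : Nat × Nat) :
    List.foldl pvStep st (pvRepl l) = List.foldl pvStep st l := by
  fun_induction pvRepl l generalizing st with
  | case1 rest ih => simp [List.foldl_cons, ih, pvStep]
  | case2 c rest hne ih => simp [List.foldl_cons, ih]
  | case3 => rfl

theorem pvFoldl_reduce (l : List Char) (st : Nat × Nat) :
    List.foldl pvStep st (pvReduce l) = List.foldl pvStep st l := by
  fun_induction pvReduce l with
  | case1 l h ih => rw [ih, pvFoldl_repl]
  | case2 l h => rfl

theorem pvReduce_noPair (l : List Char) : pvHasPair (pvReduce l) = false := by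
  fun_induction pvReduce l with
  | case1 l h ih => exact ih
  | case2 l h => simpa using h

theorem pvRepl_mem (l : List Char) (c : Char) (h : c ∈ pvRepl l) : c ∈ l := by
  fun_induction pvRepl l with
  | case1 rest ih => simp [ih h]
  | case2 d rest hne ih =>
      rcases List.mem_cons.1 h with h' | h'
      · simp [h']
      · simp [ih h']
  | case3 => simp_all

theorem pvReduce_mem (l : List Char) (c : Char) (h : c ∈ pvReduce l) : c ∈ l := by
  fun_induction pvReduce l with
  | case1 l hh ih => exact pvRepl_mem l c (ih h)
  | case2 l hh => exact h

-- a pair-free all-paren word is some ")"*p ++ "("*q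
theorem pvShape (l : List Char) (hall : ∀ c ∈ l, c = '(' ∨ c = ')')
    (hnp : pvHasPair l = false) :
    ∃ p q, l = List.replicate p ')' ++ List.replicate q '(' := by
  induction l with
  | nil => exact ⟨0, 0, rfl⟩
  | cons c t ih =>
      have hct := hall c (by simp)
      have ht : ∀ d ∈ t, d = '(' ∨ d = ')' := fun d hd => hall d (by simp [hd])
      have hnpt : pvHasPair t = false := by
        cases t with
        | nil => rfl
        | cons d u =>
            by_cases hc : c = '(' <;> by_cases hd : d = ')' <;>
              simp_all [pvHasPair]
      obtain ⟨p, q, hpq⟩ := ih ht hnpt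
      rcases hct with rfl | rfl
      · -- '(' :: t : t may not start with ')', so p = 0
        have hp0 : p = 0 := by
          by_contra hp
          have : pvHasPair ('(' :: t) = true := by
            cases p with
            | zero => exact absurd rfl hp
            | succ p' => subst hpq; simp [List.replicate_succ, pvHasPair]
          simp [this] at hnp
        subst hpq hp0
        exact ⟨0, q + 1, by simp [List.replicate_succ]⟩
      · exact ⟨p + 1, q, by simp [hpq, List.replicate_succ]⟩

theorem pvStep_canonical (p q : Nat) :
    List.foldl pvStep (0, 0) (List.replicate p ')' ++ List.replicate q '(') = (p, q) := by
  rw [List.foldl_append]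
  have h1 : List.foldl pvStep (0, 0) (List.replicate p ')') = (p, 0) := by
    have : ∀ (n a : Nat), List.foldl pvStep (a, 0) (List.replicate n ')') = (a + n, 0) := by
      intro n
      induction n with
      | zero => intro a; simp
      | succ m ih => intro a; simp [List.replicate_succ, List.foldl_cons, pvStep, ih]; omega
    simpa using this p 0
  rw [h1]
  have : ∀ (n a b : Nat), List.foldl pvStep (a, b) (List.replicate n '(') = (a, b + n) := by
    intro n
    induction n with
    | zero => intro a b; simp
    | succ m ih => intro a b; simp [List.replicate_succ, List.foldl_cons, pvStep, ih]; omega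
  simpa using this q p 0

-- B's result is the canonical word of the abstract state of the input
theorem pvAlt_canonical (l : List Char) :
    pvReduce (l.filter pvIsParen) =
      List.replicate (List.foldl pvStep (0, 0) l).1 ')' ++
      List.replicate (List.foldl pvStep (0, 0) l).2 '(' := by
  set r := pvReduce (l.filter pvIsParen) with hr
  have hall : ∀ c ∈ r, c = '(' ∨ c = ')' := by
    intro c hc
    have := pvReduce_mem _ c hc
    have hp : pvIsParen c = true := List.of_mem_filter this
    simp [pvIsParen] at hp
    tauto
  obtain ⟨p, q, hpq⟩ := pvShape r hall (pvReduce_noPair _)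
  have hfold : List.foldl pvStep (0, 0) r = List.foldl pvStep (0, 0) l := by
    rw [hr, pvFoldl_reduce, pvFoldl_filter]
  rw [hpq] at hfold
  rw [pvStep_canonical] at hfold
  rw [hpq, ← hfold]

-- A's loop invariant
theorem pvA_inv (l : List (Int × Char)) (stack : List Int) (un : List Char) (a : Nat)
    (hun : un = List.replicate a ')') :
    (l.foldl pvStepA (stack, un)).1.length =
      (List.foldl pvStep (a, stack.length) (l.map (·.2))).2 ∧
    (l.foldl pvStepA (stack, un)).2 =
      List.replicate (List.foldl pvStep (a, stack.length) (l.map (·.2))).1 ')' := by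
  induction l generalizing stack un a with
  | nil => simpa [hun] using rfl
  | cons p t ih =>
      simp only [List.foldl_cons, List.map_cons]
      by_cases h1 : p.2 = '('
      · have := ih (stack ++ [p.1]) un a hun
        simpa [pvStepA, pvStep, h1] using this
      · by_cases h2 : p.2 = ')'
        · by_cases h3 : stack = []
          · have := ih stack (un ++ [')']) (a + 1)
              (by simp [hun, List.replicate_succ'])
            subst h3
            simpa [pvStepA, pvStep, h1, h2] using this
          · have hne : stack.length ≠ 0 := by simpa using h3
            have hsa : pvStepA (stack, un) p = (stack.dropLast, un) := by
              simp [pvStepA, h2, h3]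
            have hsb : pvStep (a, stack.length) p.2 = (a, stack.length - 1) := by
              simp [pvStep, h2, hne]
            have := ih stack.dropLast un a hun
            rw [List.length_dropLast] at this
            rw [hsa, hsb]
            exact this
        · have := ih stack un a hun
          simpa [pvStepA, pvStep, h1, h2] using this

-- ===== VERDICT (by name: the statement is the Claim_ definition above) =====
theorem corresponding_spec : Claim_equal_corresponding := by
  intro input_string _
  unfold Spec_corresponding
  have hA : corresponding input_string =
      String.ofList (((PySem.List.enumerate input_string.toList 0).foldl pvStepA ([], [])).2 ++
        ((PySem.List.enumerate input_string.toList 0).foldl pvStepA ([], [])).1.map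
          (fun _ => '(')) := rfl
  have hB : corresponding_alt input_string =
      String.ofList (pvReduce (input_string.toList.filter pvIsParen)) := rfl
  have hmap : (PySem.List.enumerate input_string.toList 0).map (·.2) = input_string.toList :=
    PySem.List.map_snd_enumerate _ _
  have h := pvA_inv (PySem.List.enumerate input_string.toList 0) [] [] 0 rfl
  rw [hmap] at h
  simp only [List.length_nil] at h
  rw [hA, hB, pvAlt_canonical, h.2, List.map_const', h.1]
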